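-- pv_equiv track=rewrite | github.com/KWONDU/YonseiCS20 | Freshman/Computer Programming/lab8_2020147570 (85.71)/lab8_p2.py | removeValuesInPlace
-- ===== SOURCE A (Python) =====
-- def removeValuesInPlace(L, threshold):
--     '''
--     input: L, threshold
--     if value in list L is big than threshold,
--     append it to list L_delete
--     after every checking is finished,
--     remove value in list L_delete from list L
--     return: mutated L
--     '''
--     L_delete = []
--     for l in L:
--         if l > threshold:
--             L_delete.append(l)
--     for ld in L_delete:
--         if ld in L:
--             L.remove(ld)
--     return L
-- ===== SOURCE B (Python) =====
-- def removeValuesInPlace(L, threshold):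
--     for i in range(len(L) - 1, -1, -1):
--         if L[i] > threshold:
--             del L[i]
--     return L
-- ===== Notes on version B (the rewrite author's own statement) =====
-- stated objective: faster
-- what changed: Replaces A's two-pass collect-then-list.remove strategy (each removal re-scans the list by value) with a single reverse index loop deleting in place by index.
import Mathlib
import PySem

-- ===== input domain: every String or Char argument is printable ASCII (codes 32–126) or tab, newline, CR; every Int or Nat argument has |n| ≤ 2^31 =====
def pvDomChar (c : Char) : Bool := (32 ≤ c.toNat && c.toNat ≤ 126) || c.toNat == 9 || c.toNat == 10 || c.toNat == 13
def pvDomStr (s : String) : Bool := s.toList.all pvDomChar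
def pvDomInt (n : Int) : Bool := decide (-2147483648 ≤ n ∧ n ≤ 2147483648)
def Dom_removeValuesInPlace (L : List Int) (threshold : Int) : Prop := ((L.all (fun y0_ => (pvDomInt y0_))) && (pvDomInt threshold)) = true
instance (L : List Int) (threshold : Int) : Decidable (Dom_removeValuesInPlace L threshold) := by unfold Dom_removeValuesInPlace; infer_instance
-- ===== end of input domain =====

-- B replaces A's collect-then-list.remove two-pass strategy by a single reverse
-- index loop deleting by index in place; both mutate L (return value is what is
-- proved equal here).

-- ===== PORT A =====
def removeValuesInPlace (L : List Int) (threshold : Int) : List Int :=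
  let L_delete := L.foldl (fun acc l => if l > threshold then acc ++ [l] else acc) []
  L_delete.foldl (fun acc ld => if ld ∈ acc then (PySem.List.remove? acc ld).getD acc else acc) L

-- ===== PORT B =====
-- reverse loop 'for i in range(len(L)-1, -1, -1)': index i = n is processed first,
-- then the smaller indices on the (possibly shortened) list; 'del L[i]' is eraseIdx.
def rvLoop (threshold : Int) : Nat → List Int → List Int
  | 0, L => L
  | n + 1, L =>
      rvLoop threshold n
        (if (PySem.List.pyGet? L (n : Int)).getD threshold > threshold then L.eraseIdx n else L)

def removeValuesInPlace_alt (L : List Int) (threshold : Int) : List Int :=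
  rvLoop threshold L.length L

-- ===== PRECONDITION & SPEC =====
def Spec_removeValuesInPlace (L : List Int) (threshold : Int) (out : List Int) : Prop := out = removeValuesInPlace_alt L threshold
instance (L : List Int) (threshold : Int) (out : List Int) : Decidable (Spec_removeValuesInPlace L threshold out) := by unfold Spec_removeValuesInPlace; infer_instance

-- ===== CLAIM (what is proved, stated in full; the proofs are below) =====
def Claim_equal_removeValuesInPlace : Prop := ∀ (L : List Int) (threshold : Int), Dom_removeValuesInPlace L threshold → Spec_removeValuesInPlace L threshold (removeValuesInPlace L threshold)

-- ===== LEMMAS AND PROOFS =====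

-- B's loop, started at an in-range index bound, keeps exactly the elements ≤ threshold
-- among the first n and leaves the tail untouched.
theorem rvLoop_eq (t : Int) : ∀ (n : Nat) (L : List Int), n ≤ L.length →
    rvLoop t n L = (L.take n).filter (fun x => decide (x ≤ t)) ++ L.drop n := by
  intro n
  induction n with
  | zero => intro L _; simp [rvLoop]
  | succ n ih =>
    intro L hn
    have hlt : n < L.length := by omega
    have hget : PySem.List.pyGet? L (n : Int) = some L[n] := by
      simp [PySem.List.pyGet?_natCast, List.getElem?_eq_getElem hlt]
    by_cases hx : L[n] > t
    · have hstep : (if (PySem.List.pyGet? L (n : Int)).getD t > t then L.eraseIdx n else L)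
          = L.eraseIdx n := by rw [hget]; simp [hx]
      rw [rvLoop, hstep, ih _ (by rw [List.length_eraseIdx_of_lt hlt]; omega)]
      rw [List.eraseIdx_eq_take_drop_succ]
      have htake : (L.take n ++ L.drop (n + 1)).take n = L.take n := by
        rw [List.take_append_of_le_length (by simp; omega), List.take_take]
        simp
      have hdrop : (L.take n ++ L.drop (n + 1)).drop n = L.drop (n + 1) := by
        rw [List.drop_append_of_le_length (by simp; omega)]
        simp
      rw [htake, hdrop]
      congr 1
      have hd : decide (L[n] ≤ t) = false := by simp; omega
      rw [List.take_add_one, List.getElem?_eq_getElem hlt]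
      simp only [Option.toList_some, List.filter_append, List.filter_cons, hd,
        List.filter_nil]
      simp
    · have hstep : (if (PySem.List.pyGet? L (n : Int)).getD t > t then L.eraseIdx n else L)
          = L := by rw [hget]; simp [hx]
      rw [rvLoop, hstep, ih _ (by omega)]
      have hd : decide (L[n] ≤ t) = true := by simp; omega
      rw [List.take_add_one, List.getElem?_eq_getElem hlt, List.drop_eq_getElem_cons hlt]
      simp only [Option.toList_some, List.filter_append, List.filter_cons, hd,
        List.filter_nil, List.append_assoc]
      simp

-- A's removal step leaves a head that cannot occur in the delete list untouched.
theorem foldA_cons_ne (x : Int) (D : List Int) (hne : ∀ d ∈ D, d ≠ x) :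
    ∀ acc : List Int,
      D.foldl (fun acc ld => if ld ∈ acc then (PySem.List.remove? acc ld).getD acc else acc) (x :: acc)
        = x :: D.foldl (fun acc ld => if ld ∈ acc then (PySem.List.remove? acc ld).getD acc else acc) acc := by
  induction D with
  | nil => intro acc; simp
  | cons d D ih =>
    intro acc
    have hdx : d ≠ x := hne d (by simp)
    have hmem : (d ∈ x :: acc) = (d ∈ acc) := by simp [List.mem_cons, hdx]
    have hrem : PySem.List.remove? (x :: acc) d = (PySem.List.remove? acc d).map (x :: ·) :=
      PySem.List.remove?_cons_of_ne acc (Ne.symm hdx)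
    by_cases hd : d ∈ acc
    · have hr : PySem.List.remove? acc d = some (acc.erase d) :=
        PySem.List.remove?_eq_some_erase acc d hd
      simp only [List.foldl_cons, hmem, hd, if_true, hrem, hr, Option.map_some,
        Option.getD_some]
      exact ih (fun e he => hne e (by simp [he])) (acc.erase d)
    · simp only [List.foldl_cons, hmem, hd, if_false]
      exact ih (fun e he => hne e (by simp [he])) acc

-- Removing, in order, every element > threshold from L keeps exactly the elements ≤ threshold.
theorem foldA_filter (t : Int) : ∀ L : List Int,
    (L.filter (fun x => decide (t < x))).foldl
        (fun acc ld => if ld ∈ acc then (PySem.List.remove? acc ld).getD acc else acc) L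
      = L.filter (fun x => decide (x ≤ t)) := by
  intro L
  induction L with
  | nil => simp
  | cons x xs ih =>
    by_cases hx : t < x
    · have : (x :: xs).filter (fun x => decide (t < x)) = x :: xs.filter (fun x => decide (t < x)) := by
        simp [hx]
      rw [this, List.foldl_cons, if_pos (List.mem_cons_self),
        PySem.List.remove?_cons_self, Option.getD_some, ih]
      simp [show ¬ x ≤ t by omega]
    · have : (x :: xs).filter (fun x => decide (t < x)) = xs.filter (fun x => decide (t < x)) := by
        simp [hx]
      rw [this, foldA_cons_ne x _ (fun d hd => by
        have : t < d := by simpa using (List.mem_filter.mp hd).2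
        omega), ih]
      simp [show x ≤ t by omega]

theorem removeValuesInPlace_eq_filter (L : List Int) (t : Int) :
    removeValuesInPlace L t = L.filter (fun x => decide (x ≤ t)) := by
  simp only [removeValuesInPlace, PySem.List.foldl_append_ite_eq_filter, List.nil_append]
  simpa using foldA_filter t L

theorem removeValuesInPlace_alt_eq_filter (L : List Int) (t : Int) :
    removeValuesInPlace_alt L t = L.filter (fun x => decide (x ≤ t)) := by
  unfold removeValuesInPlace_alt
  rw [rvLoop_eq t L.length L le_rfl]
  simp

-- ===== VERDICT (by name: the statement is the Claim_ definition above) =====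
theorem removeValuesInPlace_spec : Claim_equal_removeValuesInPlace := by
  intro L t _
  unfold Spec_removeValuesInPlace
  rw [removeValuesInPlace_eq_filter, removeValuesInPlace_alt_eq_filter]
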